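-- pv_equiv track=rewrite | github.com/brrgrr/LC101_Unit1 | chapters/chapter10_assignment.py | get_country_codes_alt
-- ===== SOURCE A (Python) =====
-- def get_country_codes_alt(prices):
--     glue = ', '
--     prices_list = prices.split(glue)
--     temp_list = []
--     for i in prices_list:
--         temp_list += i.split('$')
--     country_list = []
--     for i in temp_list:
--         if i.isalpha():
--             country_list.append(i)
--     return glue.join(country_list)
-- ===== SOURCE B (Python) =====
-- def get_country_codes_alt(prices):
--     # single left-to-right scan: cut tokens at comma-space or dollar, no split calls
--     tokens = []
--     cur = []
--     i = 0
--     n = len(prices)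
--     while i < n:
--         if prices[i] == ',' and i + 1 < n and prices[i + 1] == ' ':
--             tokens.append(''.join(cur))
--             cur = []
--             i += 2
--         elif prices[i] == '$':
--             tokens.append(''.join(cur))
--             cur = []
--             i += 1
--         else:
--             cur.append(prices[i])
--             i += 1
--     tokens.append(''.join(cur))
--     return ', '.join(t for t in tokens if t.isalpha())
-- ===== Notes on version B (the rewrite author's own statement) =====
-- stated objective: alternative
-- what changed: Replaced the two-level split (first on comma-space, then each piece on the dollar sign) with its intermediate accumulation lists by a single left-to-right character scan that cuts tokens at either delimiter, then filters alphabetic tokens and joins in one pass.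
import Mathlib
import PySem

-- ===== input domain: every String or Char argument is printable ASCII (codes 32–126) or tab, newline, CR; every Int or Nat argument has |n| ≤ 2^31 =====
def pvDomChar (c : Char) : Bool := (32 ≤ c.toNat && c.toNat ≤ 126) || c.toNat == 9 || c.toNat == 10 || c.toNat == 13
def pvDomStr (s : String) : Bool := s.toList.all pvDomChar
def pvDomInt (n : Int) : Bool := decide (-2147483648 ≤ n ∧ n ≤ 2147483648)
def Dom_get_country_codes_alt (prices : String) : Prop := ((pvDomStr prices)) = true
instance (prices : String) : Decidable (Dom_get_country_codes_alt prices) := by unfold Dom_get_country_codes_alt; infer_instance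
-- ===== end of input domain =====

-- B: a single left-to-right scan that cuts tokens at either delimiter (comma-space or dollar),
-- replacing A's two-level split with intermediate lists (objective: alternative; same return value).

-- ===== PORT A =====
def get_country_codes_alt (prices : String) : String :=
  let glue : List Char := [',', ' ']
  let prices_list := PySem.Chars.splitOn prices.toList glue
  let temp_list := prices_list.foldl (fun acc i => acc ++ PySem.Chars.splitOn i ['$']) []
  let country_list :=
    temp_list.foldl (fun acc i => if PySem.Chars.strIsalpha i then acc ++ [i] else acc) []
  String.ofList (PySem.Chars.join glue country_list)

-- ===== PORT B =====
-- the while-loop scanner of Source B, as structural recursion on (remaining input, current token)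
def pvScan : List Char → List Char → List (List Char)
  | ',' :: ' ' :: rest, cur => cur :: pvScan rest []
  | '$' :: rest, cur => cur :: pvScan rest []
  | c :: rest, cur => pvScan rest (cur ++ [c])
  | [], cur => [cur]

def get_country_codes_alt_alt (prices : String) : String :=
  let tokens := pvScan prices.toList []
  String.ofList (PySem.Chars.join [',', ' '] (tokens.filter PySem.Chars.strIsalpha))

-- ===== PRECONDITION & SPEC =====
def Spec_get_country_codes_alt (prices : String) (out : String) : Prop := out = get_country_codes_alt_alt prices
instance (prices : String) (out : String) : Decidable (Spec_get_country_codes_alt prices out) := by unfold Spec_get_country_codes_alt; infer_instance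

-- ===== CLAIM (what is proved, stated in full; the proofs are below) =====
def Claim_equal_get_country_codes_alt : Prop := ∀ (prices : String), Dom_get_country_codes_alt prices → Spec_get_country_codes_alt prices (get_country_codes_alt prices)

-- ===== LEMMAS AND PROOFS =====

-- clean recursive forms of A's split(', ') and split('$')
def pvSplit2 : List Char → List (List Char)
  | [] => [[]]
  | ',' :: ' ' :: rest => [] :: pvSplit2 rest
  | c :: rest => (pvSplit2 rest).modifyHead (c :: ·)

theorem pvSplit2_cons (c : Char) (rest : List Char)
    (h : ¬ ([',', ' '].isPrefixOf (c :: rest) = true)) :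
    pvSplit2 (c :: rest) = (pvSplit2 rest).modifyHead (c :: ·) := by
  rw [pvSplit2.eq_def]
  split
  · simp_all
  · simp_all [List.isPrefixOf]
  · rename_i x c' rest' hne heq
    cases heq
    rfl

theorem pv_splitOn_go2 : ∀ (fuel : Nat) (l cur : List Char) (acc : List (List Char)),
    l.length < fuel →
    PySem.Chars.splitOn.go [',', ' '] fuel l cur acc
      = acc.reverse ++ (pvSplit2 l).modifyHead (cur.reverse ++ ·) := by
  intro fuel
  induction fuel with
  | zero => intro l cur acc h; omega
  | succ fuel ih =>
    intro l cur acc h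
    match l with
    | [] =>
      rw [PySem.Chars.splitOn.go] <;> simp [pvSplit2]
    | c :: rest =>
      rw [PySem.Chars.splitOn.go]
      by_cases hp : [',', ' '].isPrefixOf (c :: rest) = true
      · rcases rest with _ | ⟨d, r2⟩
        · simp [List.isPrefixOf] at hp
        have hcd : ',' = c ∧ ' ' = d := by simpa [List.isPrefixOf] using hp
        obtain ⟨hc, hd⟩ := hcd
        subst hc; subst hd
        simp only [if_pos hp, List.length_cons, List.drop_succ_cons, List.length_nil, List.drop_zero]
        rw [ih r2 [] (cur.reverse :: acc) (by simp at h ⊢; omega)]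
        simp only [pvSplit2]
        cases pvSplit2 r2 <;> simp
      · simp only [if_neg hp]
        rw [ih rest (c :: cur) acc (by simp at h ⊢; omega)]
        rw [pvSplit2_cons c rest hp]
        cases pvSplit2 rest <;> simp

def pvSplit1 : List Char → List (List Char)
  | [] => [[]]
  | '$' :: rest => [] :: pvSplit1 rest
  | c :: rest => (pvSplit1 rest).modifyHead (c :: ·)

theorem pvSplit1_cons (c : Char) (rest : List Char) (h : ¬ c = '$') :
    pvSplit1 (c :: rest) = (pvSplit1 rest).modifyHead (c :: ·) := by
  rw [pvSplit1.eq_def]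
  split
  · simp_all
  · simp_all
  · rename_i x c' rest' hne heq
    cases heq
    rfl

theorem pv_splitOn_go1 : ∀ (fuel : Nat) (l cur : List Char) (acc : List (List Char)),
    l.length < fuel →
    PySem.Chars.splitOn.go ['$'] fuel l cur acc
      = acc.reverse ++ (pvSplit1 l).modifyHead (cur.reverse ++ ·) := by
  intro fuel
  induction fuel with
  | zero => intro l cur acc h; omega
  | succ fuel ih =>
    intro l cur acc h
    match l with
    | [] =>
      rw [PySem.Chars.splitOn.go] <;> simp [pvSplit1]
    | c :: rest =>
      rw [PySem.Chars.splitOn.go]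
      by_cases hp : ['$'].isPrefixOf (c :: rest) = true
      · have hc : '$' = c := by simpa [List.isPrefixOf] using hp
        subst hc
        simp only [if_pos hp, List.length_cons, List.drop_succ_cons, List.length_nil, List.drop_zero]
        rw [ih rest [] (cur.reverse :: acc) (by simp at h ⊢; omega)]
        simp only [pvSplit1]
        cases pvSplit1 rest <;> simp
      · have hc : ¬ c = '$' := by intro hcc; exact hp (by simp [List.isPrefixOf, hcc])
        simp only [if_neg hp]
        rw [ih rest (c :: cur) acc (by simp at h ⊢; omega)]
        rw [pvSplit1_cons c rest hc]
        cases pvSplit1 rest <;> simp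

theorem pvSplit2_ne_nil (l : List Char) : pvSplit2 l ≠ [] := by
  fun_induction pvSplit2 l with
  | case1 => simp
  | case2 rest ih => simp
  | case3 c rest hne ih => cases hres : pvSplit2 rest <;> simp_all

theorem pvSplit1_ne_nil (l : List Char) : pvSplit1 l ≠ [] := by
  fun_induction pvSplit1 l with
  | case1 => simp
  | case2 rest ih => simp
  | case3 c rest hne ih => cases hres : pvSplit1 rest <;> simp_all

theorem pv_modifyHead_append {α : Type} (f : List α → List α) (ts us : List (List α))
    (h : ts ≠ []) : ts.modifyHead f ++ us = (ts ++ us).modifyHead f := by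
  cases ts <;> simp_all

theorem pv_flat_ne_nil (l : List Char) : (pvSplit2 l).flatMap pvSplit1 ≠ [] := by
  cases hs : pvSplit2 l with
  | nil => exact absurd hs (pvSplit2_ne_nil l)
  | cons t ts =>
    simp only [List.flatMap_cons]
    intro hemp
    rcases List.append_eq_nil_iff.mp hemp with ⟨h1, _⟩
    exact pvSplit1_ne_nil t h1

theorem pv_scan_eq : ∀ (l cur : List Char),
    pvScan l cur = ((pvSplit2 l).flatMap pvSplit1).modifyHead (cur ++ ·) := by
  intro l cur
  fun_induction pvScan l cur with
  | case1 rest cur ih =>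
    rw [ih]
    simp only [pvSplit2, List.flatMap_cons, pvSplit1, List.singleton_append]
    cases hf : (pvSplit2 rest).flatMap pvSplit1 with
    | nil => exact absurd hf (pv_flat_ne_nil rest)
    | cons t ts => simp
  | case2 rest cur ih =>
    rw [ih]
    rw [pvSplit2_cons '$' rest (by simp [List.isPrefixOf])]
    cases hs : pvSplit2 rest with
    | nil => exact absurd hs (pvSplit2_ne_nil rest)
    | cons t ts =>
      simp only [List.modifyHead_cons, List.flatMap_cons, pvSplit1, List.nil_append]
      cases hf : (pvSplit1 t ++ ts.flatMap pvSplit1) with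
      | nil =>
        rcases List.append_eq_nil_iff.mp hf with ⟨h1, _⟩
        exact absurd h1 (pvSplit1_ne_nil t)
      | cons u us => simpa using hf.symm
  | case3 c rest cur hne1 hne2 ih =>
    rw [ih]
    have hnp : ¬ ([',', ' '].isPrefixOf (c :: rest) = true) := by
      intro hp
      rcases rest with _ | ⟨d, r2⟩
      · simp [List.isPrefixOf] at hp
      · have := by simpa [List.isPrefixOf] using hp
        exact hne1 r2 this.1.symm (by rw [this.2])
    have hc : ¬ c = '$' := hne2
    rw [pvSplit2_cons c rest hnp]
    cases hs : pvSplit2 rest with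
    | nil => exact absurd hs (pvSplit2_ne_nil rest)
    | cons t ts =>
      simp only [List.modifyHead_cons, List.flatMap_cons]
      rw [pvSplit1_cons c t hc]
      rw [pv_modifyHead_append _ _ _ (pvSplit1_ne_nil t)]
      cases hf : (pvSplit1 t ++ ts.flatMap pvSplit1) with
      | nil =>
        rcases List.append_eq_nil_iff.mp hf with ⟨h1, _⟩
        exact absurd h1 (pvSplit1_ne_nil t)
      | cons u us => simp
  | case4 cur => simp [pvSplit2, pvSplit1]

theorem pv_splitOn2 (l : List Char) : PySem.Chars.splitOn l [',', ' '] = pvSplit2 l := by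
  rw [PySem.Chars.splitOn, pv_splitOn_go2 (l.length + 1) l [] [] (by omega)]
  cases pvSplit2 l <;> simp

theorem pv_splitOn1 (l : List Char) : PySem.Chars.splitOn l ['$'] = pvSplit1 l := by
  rw [PySem.Chars.splitOn, pv_splitOn_go1 (l.length + 1) l [] [] (by omega)]
  cases pvSplit1 l <;> simp

theorem pv_main (prices : String) :
    get_country_codes_alt prices = get_country_codes_alt_alt prices := by
  show String.ofList (PySem.Chars.join [',', ' ']
      (((PySem.Chars.splitOn prices.toList [',', ' ']).foldl
          (fun acc i => acc ++ PySem.Chars.splitOn i ['$']) []).foldl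
        (fun acc i => if PySem.Chars.strIsalpha i then acc ++ [i] else acc) []))
    = String.ofList (PySem.Chars.join [',', ' ']
        ((pvScan prices.toList []).filter PySem.Chars.strIsalpha))
  rw [pv_splitOn2]
  rw [PySem.List.foldl_append_eq_flatMap]
  simp only [pv_splitOn1, List.nil_append]
  rw [PySem.List.foldl_append_if PySem.Chars.strIsalpha (fun i => i)]
  rw [pv_scan_eq]
  cases hf : (pvSplit2 prices.toList).flatMap pvSplit1 with
  | nil => exact absurd hf (pv_flat_ne_nil prices.toList)
  | cons t ts => simp

-- ===== VERDICT (by name: the statement is the Claim_ definition above) =====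
theorem get_country_codes_alt_spec : Claim_equal_get_country_codes_alt := by
  intro prices _
  unfold Spec_get_country_codes_alt
  exact pv_main prices
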